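-- pv_equiv track=rewrite | github.com/AlexWUrobot/leetcode_python | Move_Same_PackageWeight.py | solve
-- ===== SOURCE A (Python) =====
-- from collections import Counter
--
-- def solve(nums):
--     d = Counter(nums)  #  key : value
--     ans = 0  # do not forget initial
--     for i in d:    # i will be key
--         if d[i] == 1:   # d[i] will be value
--             return -1
--         ans += (d[i]+2)//3
--     return ans
-- ===== SOURCE B (Python) =====
-- def solve(nums):
--     ans = 0
--     prev = 0
--     run = 0
--     for x in sorted(nums):
--         if run > 0 and x == prev:
--             run += 1
--         else:
--             if run == 1:
--                 return -1
--             ans += (run + 2) // 3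
--             prev = x
--             run = 1
--     if run == 1:
--         return -1
--     return ans + (run + 2) // 3
-- ===== Notes on version B (the rewrite author's own statement) =====
-- stated objective: alternative
-- what changed: Replaces hash counting (Counter then a key loop) by a sort-and-group single pass: sort the list, walk it tracking the current run, finalize each run as it ends (-1 on a singleton run, else add ceil(run/3)).
import Mathlib
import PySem

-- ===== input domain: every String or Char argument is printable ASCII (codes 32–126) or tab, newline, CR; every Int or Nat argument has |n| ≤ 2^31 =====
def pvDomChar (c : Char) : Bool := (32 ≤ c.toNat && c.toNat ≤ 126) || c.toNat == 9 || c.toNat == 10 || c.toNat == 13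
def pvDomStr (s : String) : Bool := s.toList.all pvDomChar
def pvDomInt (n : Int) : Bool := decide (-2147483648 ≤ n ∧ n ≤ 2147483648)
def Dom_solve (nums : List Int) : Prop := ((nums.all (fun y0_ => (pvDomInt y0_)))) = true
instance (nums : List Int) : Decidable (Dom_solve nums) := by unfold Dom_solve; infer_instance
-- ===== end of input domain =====

-- B replaces A's Counter-then-key-loop by a sort-and-group single pass (same result, alternative shape).

-- ===== PORT A =====
-- the 'for i in d' loop with early 'return -1'
def loopA (d : PySem.Dict Int Int) (keys : List Int) (ans : Int) : Int :=
  match keys with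
  | [] => ans
  | k :: rest =>
      if d.getD k 0 = 1 then -1
      else loopA d rest (ans + PySem.Int.floordiv (d.getD k 0 + 2) 3)

def solve (nums : List Int) : Int :=
  let d := PySem.Dict.counter nums
  loopA d d.keys 0

-- ===== PORT B =====
-- walk of the sorted list: prev/run = current run state, ans = finished runs
def goB (s : List Int) (prev run ans : Int) : Int :=
  match s with
  | [] => if run = 1 then -1 else ans + PySem.Int.floordiv (run + 2) 3
  | x :: rest =>
      if run > 0 ∧ x = prev then goB rest prev (run + 1) ans
      else if run = 1 then -1
      else goB rest x 1 (ans + PySem.Int.floordiv (run + 2) 3)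

def solve_alt (nums : List Int) : Int :=
  goB (PySem.List.sorted nums (fun x => x) false) 0 0 0

-- ===== PRECONDITION & SPEC =====
def Spec_solve (nums : List Int) (out : Int) : Prop := out = solve_alt nums
instance (nums : List Int) (out : Int) : Decidable (Spec_solve nums out) := by unfold Spec_solve; infer_instance

-- ===== CLAIM (what is proved, stated in full; the proofs are below) =====
def Claim_equal_solve : Prop := ∀ (nums : List Int), Dom_solve nums → Spec_solve nums (solve nums)

-- ===== LEMMAS AND PROOFS =====

-- abstract run/key processor: pairs (value, count), early -1 on a singleton count
def fpairs : List (Int × Int) → Int → Int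
  | [], ans => ans
  | (_, c) :: rest, ans =>
      if c = 1 then -1 else fpairs rest (ans + PySem.Int.floordiv (c + 2) 3)

theorem fpairs_eq (l : List (Int × Int)) (a : Int) :
    fpairs l a = if ∃ p ∈ l, p.2 = 1 then -1
                 else a + (l.map (fun p => PySem.Int.floordiv (p.2 + 2) 3)).sum := by
  induction l generalizing a with
  | nil => simp [fpairs]
  | cons p rest ih =>
      obtain ⟨k, c⟩ := p
      by_cases hc : c = 1
      · simp [fpairs, hc]
      · simp only [fpairs, hc, if_false, ih, List.map_cons, List.sum_cons, List.mem_cons]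
        by_cases hex : ∃ q ∈ rest, q.2 = 1
        · simp [hex, hc]
        · have hno : ¬ ∃ p ∈ (k, c) :: rest, p.2 = 1 := by
            rintro ⟨q, hq, h1⟩
            rcases List.mem_cons.mp hq with h | h
            · subst h; exact hc h1
            · exact hex ⟨q, h, h1⟩
          rw [if_neg hno, if_neg hex]
          ring

theorem fpairs_perm {l₁ l₂ : List (Int × Int)} (h : l₁.Perm l₂) (a : Int) :
    fpairs l₁ a = fpairs l₂ a := by
  rw [fpairs_eq, fpairs_eq]
  have hmem : (∃ p ∈ l₁, p.2 = 1) ↔ (∃ p ∈ l₂, p.2 = 1) := by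
    constructor <;> rintro ⟨p, hp, h1⟩
    · exact ⟨p, h.mem_iff.mp hp, h1⟩
    · exact ⟨p, h.mem_iff.mpr hp, h1⟩
  rw [(h.map (fun p => PySem.Int.floordiv (p.2 + 2) 3)).sum_eq]
  by_cases hx : ∃ p ∈ l₁, p.2 = 1
  · simp [hx, hmem.mp hx]
  · simp [hx, hmem.not.mp hx]

theorem loopA_eq (d : PySem.Dict Int Int) (keys : List Int) (ans : Int) :
    loopA d keys ans = fpairs (keys.map (fun k => (k, d.getD k 0))) ans := by
  induction keys generalizing ans with
  | nil => rfl
  | cons k rest ih => by_cases h : d.getD k 0 = 1 <;> simp [loopA, fpairs, h, ih]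

theorem goB_replicate (n : Nat) (v run ans : Int) (rest : List Int) (h : 0 < run) :
    goB (List.replicate n v ++ rest) v run ans = goB rest v (run + n) ans := by
  induction n generalizing run with
  | zero => simp
  | succ m ih =>
      rw [List.replicate_succ, List.cons_append, goB]
      rw [if_pos ⟨h, rfl⟩, ih (run + 1) (by omega)]
      have harg : run + 1 + (m : Int) = run + ((m + 1 : Nat) : Int) := by push_cast; ring
      rw [harg]

theorem goB_groups (g : List (Int × Nat)) (prev run ans : Int) (hrun : 0 < run)
    (hpos : ∀ p ∈ g, 0 < p.2) (hchain : (g.map Prod.fst).Pairwise (· ≠ ·))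
    (hhead : ∀ p ∈ g.head?, p.1 ≠ prev) :
    goB (g.flatMap (fun p => List.replicate p.2 p.1)) prev run ans
      = fpairs ((prev, run) :: g.map (fun p => (p.1, (p.2 : Int)))) ans := by
  induction g generalizing prev run ans with
  | nil => simp [goB, fpairs]
  | cons p g' ih =>
      obtain ⟨v, c⟩ := p
      have hc : 0 < c := hpos (v, c) (by simp)
      have hvprev : v ≠ prev := hhead (v, c) (by simp)
      obtain ⟨c', rfl⟩ : ∃ c', c = c' + 1 := ⟨c - 1, by omega⟩
      rw [List.flatMap_cons, List.replicate_succ, List.cons_append, goB]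
      rw [if_neg (by rintro ⟨_, h⟩; exact hvprev h)]
      rw [fpairs]
      by_cases h1 : run = 1
      · simp [h1]
      · rw [if_neg h1, if_neg h1]
        rw [goB_replicate c' v 1 _ _ (by omega)]
        have hpw := List.pairwise_cons.mp
          (show (v :: g'.map Prod.fst).Pairwise (· ≠ ·) by simpa using hchain)
        have hh' : ∀ q ∈ g'.head?, q.1 ≠ v := by
          intro q hq
          exact (hpw.1 q.1 (List.mem_map_of_mem (List.mem_of_mem_head? hq))).symm
        rw [ih v (1 + c') (ans + PySem.Int.floordiv (run + 2) 3) (by omega)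
              (fun q hq => hpos q (by simp [hq])) hpw.2 hh']
        have harg : (1 + (c' : Int)) = ((c' + 1 : Nat) : Int) := by push_cast; ring
        rw [harg]
        simp

theorem count_flatMap_replicate (f : Int → Nat) (vs : List Int) (h : vs.Nodup) (a : Int) :
    (vs.flatMap (fun v => List.replicate (f v) v)).count a = if a ∈ vs then f a else 0 := by
  induction vs with
  | nil => simp
  | cons v t ih =>
      rw [List.flatMap_cons, List.count_append, List.count_replicate,
          ih (List.nodup_cons.mp h).2]
      by_cases hav : a = v
      · subst hav
        have : a ∉ t := (List.nodup_cons.mp h).1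
        simp [this]
      · have hva : ¬ v = a := fun h => hav h.symm
        simp [hav, hva, List.mem_cons]

theorem expand_pairwise (f : Int → Nat) (vs : List Int) (h : vs.Pairwise (· < ·)) :
    (vs.flatMap (fun v => List.replicate (f v) v)).Pairwise (· ≤ ·) := by
  induction vs with
  | nil => simp
  | cons v t ih =>
      rw [List.flatMap_cons, List.pairwise_append]
      have hp := List.pairwise_cons.mp h
      refine ⟨?_, ih hp.2, ?_⟩
      · exact List.pairwise_replicate.mpr (Or.inr (le_refl v))
      · intro x hx y hy
        obtain rfl := List.eq_of_mem_replicate hx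
        obtain ⟨u, hu, hyu⟩ := List.mem_flatMap.mp hy
        obtain rfl := List.eq_of_mem_replicate hyu
        exact le_of_lt (hp.1 y hu)

theorem mem_sortedSet (nums : List Int) (a : Int) :
    a ∈ PySem.List.sorted (PySem.Set.ofList nums) (fun x => x) false ↔ a ∈ nums := by
  rw [PySem.List.mem_sorted]
  exact PySem.Set.mem_ofList (xs := nums) (y := a)

theorem nodup_sortedSet (nums : List Int) :
    (PySem.List.sorted (PySem.Set.ofList nums) (fun x => x) false).Nodup :=
  (PySem.List.sorted_perm (PySem.Set.ofList nums) (fun x => x) false).symm.nodup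
    (PySem.Set.nodup_ofList nums)

theorem sorted_eq_expand (nums : List Int) :
    PySem.List.sorted nums (fun x => x) false
      = (PySem.List.sorted (PySem.Set.ofList nums) (fun x => x) false).flatMap
          (fun v => List.replicate (nums.count v) v) := by
  apply PySem.List.sorted_id_eq_of_perm_of_pairwise
  · apply List.perm_iff_count.mpr
    intro a
    rw [count_flatMap_replicate _ _ (nodup_sortedSet nums) a]
    by_cases ha : a ∈ nums
    · simp [(mem_sortedSet nums a).mpr ha]
    · have hns : a ∉ PySem.List.sorted (PySem.Set.ofList nums) (fun x => x) false :=
        fun h => ha ((mem_sortedSet nums a).mp h)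
      simp [hns, List.count_eq_zero.mpr ha]
  · exact expand_pairwise _ _ (PySem.List.sorted_ofList_pairwise_lt nums)

theorem solve_alt_eq (nums : List Int) :
    solve_alt nums
      = fpairs ((PySem.List.sorted (PySem.Set.ofList nums) (fun x => x) false).map
          (fun v => (v, (nums.count v : Int)))) 0 := by
  unfold solve_alt
  rw [sorted_eq_expand]
  cases hvs : PySem.List.sorted (PySem.Set.ofList nums) (fun x => x) false with
  | nil => simp [goB, fpairs]
  | cons v t =>
      have hv : v ∈ nums := (mem_sortedSet nums v).mp (hvs ▸ List.mem_cons_self ..)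
      have hc : 0 < nums.count v := List.count_pos_iff.mpr hv
      obtain ⟨c', hcc⟩ : ∃ c', nums.count v = c' + 1 := ⟨nums.count v - 1, by omega⟩
      have hpwlt := hvs ▸ PySem.List.sorted_ofList_pairwise_lt nums
      have hp := List.pairwise_cons.mp hpwlt
      rw [List.flatMap_cons, hcc, List.replicate_succ, List.cons_append, goB]
      rw [if_neg (by rintro ⟨h, _⟩; exact absurd h (by norm_num))]
      rw [if_neg (by norm_num)]
      have hz : (0 : Int) + PySem.Int.floordiv (0 + 2) 3 = 0 := by decide
      rw [hz, goB_replicate c' v 1 0 _ (by norm_num)]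
      have hexp : t.flatMap (fun v => List.replicate (nums.count v) v)
          = (t.map (fun u => (u, nums.count u))).flatMap (fun p => List.replicate p.2 p.1) := by
        rw [List.flatMap_map]
      rw [hexp]
      rw [goB_groups (t.map (fun u => (u, nums.count u))) v (1 + c') 0 (by omega)
            (by
              rintro p hp'
              obtain ⟨u, hu, rfl⟩ := List.mem_map.mp hp'
              exact List.count_pos_iff.mpr ((mem_sortedSet nums u).mp (hvs ▸ List.mem_cons_of_mem v hu)))
            (by
              simp only [List.map_map]
              have : (t.map (Prod.fst ∘ fun u => (u, nums.count u))) = t := by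
                simp [Function.comp_def]
              rw [this]
              exact hp.2.imp (fun h => ne_of_lt h))
            (by
              intro q hq
              obtain ⟨u, hu, rfl⟩ := List.mem_map.mp (List.mem_of_mem_head? hq)
              exact ne_of_gt (hp.1 u hu))]
      have h1 : ((1 : Int) + c') = ((nums.count v : Nat) : Int) := by rw [hcc]; push_cast; ring
      rw [List.map_cons, h1, List.map_map]
      simp [Function.comp_def]

theorem solve_eq (nums : List Int) :
    solve nums
      = fpairs ((PySem.Set.ofList nums).map (fun k => (k, (nums.count k : Int)))) 0 := by
  unfold solve
  rw [loopA_eq]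
  simp only [PySem.Dict.keys_counter, PySem.Dict.getD_counter]

-- ===== VERDICT (by name: the statement is the Claim_ definition above) =====
theorem solve_spec : Claim_equal_solve := by
  intro nums _
  unfold Spec_solve
  rw [solve_eq, solve_alt_eq]
  exact fpairs_perm ((PySem.List.sorted_perm (PySem.Set.ofList nums) (fun x => x) false).symm.map
    (fun k => (k, (nums.count k : Int)))) 0
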